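-- pv_equiv track=rewrite | github.com/humairshoukat/arbisoft-coding-test | arbisoft-coding-test-2023/solutions/tourist-23.py | minimum_cars_required
-- ===== SOURCE A (Python) =====
-- def minimum_cars_required(tourists, seats):
--     """
--     Calculate & return the min number of cars required for all tourists
--     """
--     total_tourists = sum(tourists)
--     seats.sort(reverse=True)
--
--     cars_with_max_seats = []
--
--     for seat in seats:
--         cars_with_max_seats.append(seat)
--         if sum(cars_with_max_seats) > total_tourists:
--             return(len(cars_with_max_seats))
-- ===== SOURCE B (Python) =====
-- def minimum_cars_required(tourists, seats):
--     """Selection-based: repeatedly pull the biggest remaining car, no sorting."""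
--     total = sum(tourists)
--     remaining = list(seats)
--     boarded = 0
--     cars = 0
--     while remaining:
--         biggest = max(remaining)
--         remaining.remove(biggest)
--         boarded += biggest
--         cars += 1
--         if boarded > total:
--             return cars
-- ===== Notes on version B (the rewrite author's own statement) =====
-- stated objective: alternative
-- what changed: Replaces sort-then-scan (re-summing the accumulator list every step) by a selection algorithm: repeatedly extract the maximum of the remaining seat pool with a running boarded total, never sorting; also leaves the argument unmutated.
import Mathlib
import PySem

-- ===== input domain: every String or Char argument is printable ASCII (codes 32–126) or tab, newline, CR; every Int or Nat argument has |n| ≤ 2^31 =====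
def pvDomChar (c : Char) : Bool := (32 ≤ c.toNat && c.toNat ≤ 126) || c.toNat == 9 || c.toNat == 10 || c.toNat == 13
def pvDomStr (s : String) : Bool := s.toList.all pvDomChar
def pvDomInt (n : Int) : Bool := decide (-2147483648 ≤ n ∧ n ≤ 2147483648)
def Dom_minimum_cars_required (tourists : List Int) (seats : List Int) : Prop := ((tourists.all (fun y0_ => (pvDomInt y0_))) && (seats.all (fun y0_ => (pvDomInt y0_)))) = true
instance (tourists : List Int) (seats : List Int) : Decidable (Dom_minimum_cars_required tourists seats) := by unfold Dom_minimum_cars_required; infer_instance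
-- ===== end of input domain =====

-- ===== PORT A =====
-- Note: Python A sorts `seats` in place; equivalence here is about the RETURN value only
-- (B never mutates its arguments). B is a selection algorithm: no sort, repeated max-extraction.
-- A's loop: append seat to cars_with_max_seats, check sum(cars_with_max_seats) > total
def pvGoA (total : Int) (cars : List Int) : List Int → Option Int
  | [] => none
  | seat :: rest =>
    let cars' := cars ++ [seat]
    if cars'.sum > total then some (cars'.length : Int) else pvGoA total cars' rest

def minimum_cars_required (tourists : List Int) (seats : List Int) : Option Int :=
  pvGoA tourists.sum [] (PySem.List.sorted seats (fun x => x) true)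

-- ===== PORT B =====
-- termination fact for the selection loop (list.remove shortens the list); cited by decreasing_by
theorem pvRemove_length_lt (xs ys : List Int) (v : Int)
    (h : PySem.List.remove? xs v = some ys) : ys.length < xs.length := by
  have hv : v ∈ xs := by
    by_contra hv
    rw [(PySem.List.remove?_eq_none_iff xs v).mpr hv] at h
    simp at h
  rw [PySem.List.remove?_eq_some_erase xs v hv] at h
  cases h
  have := List.length_erase_of_mem hv
  have := List.length_pos_of_mem hv
  omega

-- B's while loop: biggest = max(remaining); remaining.remove(biggest); boarded += biggest; cars += 1
def pvGoSel (total boarded cars : Int) (remaining : List Int) : Option Int :=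
  match PySem.List.max? remaining (fun x => x) with
  | none => none        -- remaining is empty: the while loop ends, Python returns None
  | some biggest =>
    match h : PySem.List.remove? remaining biggest with
    | none => none      -- unreachable: max returns an element of the list
    | some remaining' =>
      let boarded' := boarded + biggest
      let cars' := cars + 1
      if boarded' > total then some cars'
      else pvGoSel total boarded' cars' remaining'
termination_by remaining.length
decreasing_by exact pvRemove_length_lt _ _ _ h

def minimum_cars_required_alt (tourists : List Int) (seats : List Int) : Option Int :=
  pvGoSel tourists.sum 0 0 seats

-- ===== PRECONDITION & SPEC =====
def Spec_minimum_cars_required (tourists : List Int) (seats : List Int) (out : Option Int) : Prop := out = minimum_cars_required_alt tourists seats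
instance (tourists : List Int) (seats : List Int) (out : Option Int) : Decidable (Spec_minimum_cars_required tourists seats out) := by unfold Spec_minimum_cars_required; infer_instance

-- ===== CLAIM (what is proved, stated in full; the proofs are below) =====
def Claim_equal_minimum_cars_required : Prop := ∀ (tourists : List Int) (seats : List Int), Dom_minimum_cars_required tourists seats → Spec_minimum_cars_required tourists seats (minimum_cars_required tourists seats)

-- ===== LEMMAS AND PROOFS =====
-- common reference scan: running sum and 1-based index over an already-descending list
def pvGoRef (total running i : Int) : List Int → Option Int
  | [] => none
  | seat :: rest =>
    let running' := running + seat
    if running' > total then some i else pvGoRef total running' (i + 1) rest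

-- A's scan equals the reference scan
theorem pvGoA_eq_ref (total : Int) (l : List Int) : ∀ cars : List Int,
    pvGoA total cars l = pvGoRef total cars.sum (cars.length + 1) l := by
  induction l with
  | nil => intro cars; rfl
  | cons seat rest ih =>
    intro cars
    simp only [pvGoA, pvGoRef]
    have hs : (cars ++ [seat]).sum = cars.sum + seat := by simp
    have hl : ((cars ++ [seat]).length : Int) = (cars.length : Int) + 1 := by simp
    rw [hs, hl]
    split_ifs with h
    · rfl
    · rw [ih (cars ++ [seat]), hs, hl]

-- pulling the maximum off the front IS the head of the descending sort
theorem sortedDesc_cons_max (l : List Int) (m : Int)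
    (hm : PySem.List.max? l (fun x => x) = some m) :
    PySem.List.sorted l (fun x => x) true = m :: PySem.List.sorted (l.erase m) (fun x => x) true := by
  have hmem : m ∈ l := PySem.List.max?_mem hm
  have hmax : ∀ y ∈ l, y ≤ m := by
    intro y hy; exact PySem.List.max?_isMax hm y hy
  -- both sides are descending-sorted rearrangements of the same multiset
  have hperm : (PySem.List.sorted l (fun x => x) true).Perm
      (m :: PySem.List.sorted (l.erase m) (fun x => x) true) :=
    List.Perm.trans (List.Perm.trans (PySem.List.sorted_perm l (fun x => x) true)
        (List.perm_cons_erase hmem))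
      (List.Perm.cons m (PySem.List.sorted_perm (l.erase m) (fun x => x) true).symm)
  have h1 : (PySem.List.sorted l (fun x => x) true).Pairwise (fun a b => b ≤ a) :=
    PySem.List.sorted_pairwise_rev l (fun x => x)
  have h2 : (m :: PySem.List.sorted (l.erase m) (fun x => x) true).Pairwise (fun a b => b ≤ a) := by
    refine List.Pairwise.cons ?_ (PySem.List.sorted_pairwise_rev (l.erase m) (fun x => x))
    intro y hy
    exact hmax y (List.mem_of_mem_erase
      (((PySem.List.sorted_perm (l.erase m) (fun x => x) true).mem_iff).mp hy))
  exact hperm.eq_of_pairwise (fun a b _ _ h h' => le_antisymm h' h) h1 h2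

-- B's selection loop equals the reference scan over the descending sort
theorem pvGoSel_eq_ref (n : Nat) : ∀ (l : List Int), l.length = n → ∀ (total r c : Int),
    pvGoSel total r c l = pvGoRef total r (c + 1) (PySem.List.sorted l (fun x => x) true) := by
  induction n using Nat.strong_induction_on with
  | _ n ih =>
    intro l hn total r c
    rw [pvGoSel]
    split
    case _ hmx =>
      have : l = [] := (PySem.List.max?_eq_none_iff _ _).mp hmx
      subst this
      simp [PySem.List.sorted, pvGoRef]
    case _ m hmx =>
      have hmem : m ∈ l := PySem.List.max?_mem hmx
      have hrem : PySem.List.remove? l m = some (l.erase m) :=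
        PySem.List.remove?_eq_some_erase l m hmem
      split
      case _ hnone => rw [hrem] at hnone; simp at hnone
      case _ rem' hsome =>
        have hrem' : rem' = l.erase m := by rw [hrem] at hsome; cases hsome; rfl
        subst hrem'
        rw [sortedDesc_cons_max l m hmx]
        simp only [pvGoRef]
        split_ifs with h
        · rfl
        · have hlt : (l.erase m).length < n := by
            have := List.length_erase_of_mem hmem
            have := List.length_pos_of_mem hmem
            omega
          rw [ih _ hlt _ rfl]

-- ===== VERDICT (by name: the statement is the Claim_ definition above) =====
theorem minimum_cars_required_spec : Claim_equal_minimum_cars_required := by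
  intro tourists seats _
  unfold Spec_minimum_cars_required minimum_cars_required minimum_cars_required_alt
  rw [pvGoSel_eq_ref seats.length seats rfl, pvGoA_eq_ref]
  norm_num
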